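-- pv_equiv track=rewrite | github.com/apache/spark | dev/compare-builds.py | _class_package_counts
-- ===== SOURCE A (Python) =====
-- from collections import Counter
-- from typing import Dict, List, Optional, Set, Tuple, TypedDict, Union
--
-- def _class_package_counts(classes: Set[str]) -> Dict[str, int]:
--     """Return {package: count} dict for JSON output, collapsing child packages."""
--     pkg_counts: Counter = Counter()
--     for cls in classes:
--         idx = cls.rfind("/")
--         pkg = cls[: idx + 1] if idx >= 0 else "(default)"
--         pkg_counts[pkg] += 1
--
--     collapsed: Dict[str, int] = {}
--     for pkg in sorted(pkg_counts, key=lambda p: -p.count("/")):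
--         merged = False
--         for existing in list(collapsed):
--             if pkg.startswith(existing) and pkg != existing:
--                 collapsed[existing] += pkg_counts[pkg]
--                 merged = True
--                 break
--         if not merged:
--             collapsed[pkg] = pkg_counts[pkg]
--     return dict(sorted(collapsed.items(), key=lambda x: -x[1]))
-- ===== SOURCE B (Python) =====
-- from collections import Counter
--
--
-- def _class_package_counts(classes):
--     """Return {package: count} dict for JSON output.
--
--     A's collapse loop can never merge (a proper prefix of a package that is
--     itself a package always has strictly fewer '/'), so the result is just the
--     per-package counts ordered by descending count, ties by descending depth.
--     """
--     pkg_counts = Counter()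
--     for cls in classes:
--         idx = cls.rfind("/")
--         pkg_counts[cls[: idx + 1] if idx >= 0 else "(default)"] += 1
--     by_depth = sorted(pkg_counts.items(), key=lambda x: -x[0].count("/"))
--     return dict(sorted(by_depth, key=lambda x: -x[1]))
-- ===== Notes on version B (the rewrite author's own statement) =====
-- stated objective: simpler
-- what changed: B drops A's quadratic collapse loop entirely (it can never merge, since a proper prefix of a package always has strictly fewer '/' and A processes deeper packages first) and instead orders the counted items directly: stable-sort by descending depth, then by descending count.
import Mathlib
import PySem

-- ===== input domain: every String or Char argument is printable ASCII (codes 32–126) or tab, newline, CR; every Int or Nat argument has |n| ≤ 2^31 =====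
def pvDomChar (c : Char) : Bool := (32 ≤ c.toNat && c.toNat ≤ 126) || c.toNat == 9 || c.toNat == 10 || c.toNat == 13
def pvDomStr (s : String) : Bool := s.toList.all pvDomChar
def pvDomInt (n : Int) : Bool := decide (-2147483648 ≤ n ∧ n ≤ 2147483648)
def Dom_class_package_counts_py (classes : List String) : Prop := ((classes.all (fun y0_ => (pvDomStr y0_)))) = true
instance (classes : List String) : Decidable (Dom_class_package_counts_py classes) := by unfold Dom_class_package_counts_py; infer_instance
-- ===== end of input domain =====

-- B replaces A's quadratic collapse loop (which can never merge: a proper prefix of a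
-- package always has strictly fewer '/' and A visits deeper packages first) by ordering
-- the counted items directly: stable sort by descending depth, then by descending count.
-- Return-value equivalence; the Python argument is a set, both ports read the list order.

-- shared helper: both Pythons compute the package of a class with the same two lines
def pkgOf (cls : String) : String :=
  let idx := PySem.Str.rfind cls "/"
  if 0 ≤ idx then PySem.Str.slice cls none (some (idx + 1)) else "(default)"

-- ===== PORT A =====
def class_package_counts_py (classes : List String) : List (String × Int) :=
  let pkg_counts := classes.foldl (fun d cls => d.modify (pkgOf cls) 0 (· + 1))
    (PySem.Dict.empty : PySem.Dict String Int)
  let sortedPkgs := PySem.List.sorted pkg_counts.keys (fun p => -((PySem.Str.count p "/" : Nat) : Int))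
  let collapsed := sortedPkgs.foldl (fun c pkg =>
      match c.keys.find? (fun existing => PySem.Str.startswith pkg existing && !(pkg == existing)) with
      | some existing => c.insert existing (c.getD existing 0 + pkg_counts.getD pkg 0)
      | none => c.insert pkg (pkg_counts.getD pkg 0)) (PySem.Dict.empty : PySem.Dict String Int)
  (PySem.Dict.ofList (PySem.List.sorted collapsed.items (fun x => -x.2))).items

-- ===== PORT B =====
def class_package_counts_py_alt (classes : List String) : List (String × Int) :=
  let pkg_counts := classes.foldl (fun d cls => d.modify (pkgOf cls) 0 (· + 1))
    (PySem.Dict.empty : PySem.Dict String Int)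
  let by_depth := PySem.List.sorted pkg_counts.items (fun x => -((PySem.Str.count x.1 "/" : Nat) : Int))
  (PySem.Dict.ofList (PySem.List.sorted by_depth (fun x => -x.2))).items

-- ===== PRECONDITION & SPEC =====
def Spec_class_package_counts_py (classes : List String) (out : List (String × Int)) : Prop := out = class_package_counts_py_alt classes
instance (classes : List String) (out : List (String × Int)) : Decidable (Spec_class_package_counts_py classes out) := by unfold Spec_class_package_counts_py; infer_instance

-- ===== CLAIM (what is proved, stated in full; the proofs are below) =====
def Claim_equal_class_package_counts_py : Prop := ∀ (classes : List String), Dom_class_package_counts_py classes → Spec_class_package_counts_py classes (class_package_counts_py classes)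

-- ===== LEMMAS AND PROOFS =====

-- Python's s.count(c) (non-overlapping substring count) for a 1-char pattern is List.count
theorem count_go_single (c : Char) : ∀ (fuel : Nat) (l : List Char) (acc : Nat),
    l.length ≤ fuel → PySem.Chars.count.go [c] fuel l acc = acc + l.count c := by
  intro fuel
  induction fuel with
  | zero =>
    intro l acc h
    have hl : l = [] := List.eq_nil_of_length_eq_zero (Nat.le_zero.mp h)
    subst hl
    simp [PySem.Chars.count.go]
  | succ n ih =>
    intro l acc h
    cases l with
    | nil => simp [PySem.Chars.count.go]
    | cons hd t =>
      have ht : t.length ≤ n := by simpa using h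
      have hpre : ([c].isPrefixOf (hd :: t)) = (c == hd) := by simp [List.isPrefixOf]
      simp only [PySem.Chars.count.go, hpre]
      by_cases hc : c = hd
      · subst hc
        simp only [beq_self_eq_true, if_true]
        have hdrop : List.drop [c].length (c :: t) = t := by simp
        rw [hdrop, ih t (acc + 1) ht]
        simp
        omega
      · have hcb : (c == hd) = false := by simp [hc]
        simp only [hcb, Bool.false_eq_true, if_false]
        rw [ih t acc ht]
        simp [List.count_cons]
        exact fun hh => hc hh.symm

theorem chars_count_single (c : Char) (s : List Char) : PySem.Chars.count s [c] = s.count c := by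
  have h := count_go_single c s.length s 0 (le_refl _)
  simp [PySem.Chars.count, h]

-- rfind's result, when ≥ 0, points at an occurrence of sub
theorem rfind_go_prefix (s sub : List Char) : ∀ (n : Nat),
    0 ≤ PySem.Chars.rfind.go s sub n →
    ∃ k : Nat, PySem.Chars.rfind.go s sub n = (k : Int) ∧ sub.isPrefixOf (s.drop k) = true := by
  intro n
  induction n with
  | zero =>
    intro h
    simp only [PySem.Chars.rfind.go] at h ⊢
    by_cases hp : sub.isPrefixOf s = true
    · exact ⟨0, by simp [hp], by simpa using hp⟩
    · simp [hp] at h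
  | succ j ih =>
    intro h
    simp only [PySem.Chars.rfind.go] at h ⊢
    by_cases hp : sub.isPrefixOf (s.drop (j + 1)) = true
    · exact ⟨j + 1, by simp [hp], hp⟩
    · simp only [hp, Bool.false_eq_true, if_false] at h ⊢
      exact ih h

-- every package produced by pkgOf is "(default)" or ends with '/'
def PkgShape (s : String) : Prop :=
  s = "(default)" ∨ (s.toList ≠ [] ∧ s.toList.getLast? = some '/')

theorem pkgOf_shape (cls : String) : PkgShape (pkgOf cls) := by
  unfold PkgShape
  simp only [pkgOf]
  by_cases h : 0 ≤ PySem.Str.rfind cls "/"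
  · rw [if_pos h]
    right
    have hsl : ("/" : String).toList = ['/'] := by decide
    have h' : 0 ≤ PySem.Chars.rfind.go cls.toList ['/'] cls.toList.length := by
      rw [PySem.Str.rfind_eq, hsl] at h
      exact h
    obtain ⟨k, hk, hpre⟩ := rfind_go_prefix cls.toList ['/'] cls.toList.length h'
    have hrw : PySem.Str.rfind cls "/" = (k : Int) := by
      rw [PySem.Str.rfind_eq, hsl]
      exact hk
    obtain ⟨r, hr⟩ := List.isPrefixOf_iff_prefix.mp hpre
    have hget : cls.toList[k]? = some '/' := by
      rw [← List.head?_drop, ← hr]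
      rfl
    have hslice : (PySem.Str.slice cls none (some (PySem.Str.rfind cls "/" + 1))).toList
        = cls.toList.take (k + 1) := by
      rw [hrw, PySem.Str.toList_slice, PySem.Chars.slice_eq_listSlice,
        PySem.List.slice_to cls.toList (b := (k : Int) + 1) (by omega)]
      have htn : ((k : Int) + 1).toNat = k + 1 := by omega
      rw [htn]
    have hk1 : cls.toList.take (k + 1) = cls.toList.take k ++ ['/'] := by
      rw [List.take_add_one, hget]
      rfl
    constructor
    · rw [hslice, hk1]
      simp
    · rw [hslice, hk1, List.getLast?_concat]
  · rw [if_neg h]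
    left
    rfl

-- a package with at least as many '/' as another is never its proper prefix
theorem no_proper_prefix (e p : String) (he : PkgShape e) (hp : PkgShape p)
    (hcnt : p.toList.count '/' ≤ e.toList.count '/') :
    ¬ (e.toList <+: p.toList ∧ p ≠ e) := by
  rintro ⟨hpre, hne⟩
  obtain ⟨t, ht⟩ := hpre
  have htne : t ≠ [] := by
    rintro rfl
    apply hne
    apply String.toList_inj.mp
    rw [← ht]
    simp
  rcases hp with hp | ⟨hpne, hplast⟩
  · subst hp
    rcases he with he | ⟨hene, helast⟩
    · exact hne he.symm
    · have hmem : '/' ∈ e.toList := by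
        obtain ⟨l', hl'⟩ := List.getLast?_eq_some_iff.mp helast
        rw [hl']
        simp
      have : '/' ∈ ("(default)" : String).toList := by
        rw [← ht]
        exact List.mem_append.mpr (Or.inl hmem)
      revert this
      decide
  · have hcount : p.toList.count '/' = e.toList.count '/' + t.count '/' := by
      rw [← ht, List.count_append]
    have hlastt : t.getLast? = some '/' := by
      rw [← ht, List.getLast?_append_of_ne_nil _ htne] at hplast
      exact hplast
    have hmemt : '/' ∈ t := by
      obtain ⟨l', hl'⟩ := List.getLast?_eq_some_iff.mp hlastt
      rw [hl']
      simp
    have : 0 < t.count '/' := List.count_pos_iff.mpr hmemt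
    omega

-- a stable insertion into a mapped list is the mapped stable insertion
theorem insertBy_map {α β : Type} (f : α → β) (b : β → β → Bool) (x : α) (l : List α) :
    PySem.List.insertBy b (f x) (l.map f) =
      (PySem.List.insertBy (fun a c => b (f a) (f c)) x l).map f := by
  induction l with
  | nil => simp [PySem.List.insertBy]
  | cons y ys ih =>
    simp only [List.map_cons, PySem.List.insertBy]
    by_cases hb : b (f x) (f y) = true
    · simp [hb]
    · simp only [hb, Bool.false_eq_true, if_false, List.map_cons]
      rw [ih]

-- a stable sort of a mapped list is the mapped stable sort (key composed with the map)
theorem sorted_map_comm {α β κ : Type} [LT κ] [DecidableLT κ] (f : α → β) (key : β → κ)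
    (l : List α) :
    PySem.List.sorted (l.map f) key = (PySem.List.sorted l (fun a => key (f a))).map f := by
  rw [PySem.List.sorted_eq_foldl_insertBy, PySem.List.sorted_eq_foldl_insertBy, List.foldl_map]
  have h : ∀ (acc : List α),
      l.foldl (fun acc x => PySem.List.insertBy (fun a b => decide (key a < key b)) (f x) acc)
        (acc.map f)
      = (l.foldl (fun acc x =>
          PySem.List.insertBy (fun a b => decide (key (f a) < key (f b))) x acc) acc).map f := by
    induction l with
    | nil => intro acc; simp
    | cons y ys ih =>
      intro acc
      simp only [List.foldl_cons]
      rw [insertBy_map f (fun a b => decide (key a < key b)) y acc]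
      exact ih _
  simpa using h []

-- A's collapse loop over a list in which no earlier element is a proper prefix of a later
-- one never merges: it just rebuilds the (pkg, count) pairs in order.
theorem collapse_no_merge (pc : PySem.Dict String Int) : ∀ (L : List String) (c : PySem.Dict String Int),
    (c.keys ++ L).Nodup →
    (c.keys ++ L).Pairwise (fun e p => ¬ (e.toList <+: p.toList ∧ p ≠ e)) →
    (L.foldl (fun c pkg =>
      match c.keys.find? (fun existing => PySem.Str.startswith pkg existing && !(pkg == existing)) with
      | some existing => c.insert existing (c.getD existing 0 + pc.getD pkg 0)
      | none => c.insert pkg (pc.getD pkg 0)) c).items = c.items ++ L.map (fun p => (p, pc.getD p 0)) := by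
  intro L
  induction L with
  | nil =>
    intro c _ _
    simp
  | cons p t ih =>
    intro c hnd hpw
    have hfind : c.keys.find?
        (fun existing => PySem.Str.startswith p existing && !(p == existing)) = none := by
      apply List.find?_eq_none.mpr
      intro e he
      have hpair : ¬ (e.toList <+: p.toList ∧ p ≠ e) :=
        (List.pairwise_append.mp hpw).2.2 e he p List.mem_cons_self
      intro hb
      apply hpair
      simp only [Bool.and_eq_true, Bool.not_eq_true'] at hb
      obtain ⟨h1, h2⟩ := hb
      refine ⟨?_, ?_⟩
      · rw [PySem.Str.startswith_eq] at h1
        exact (PySem.Chars.startswith_iff _ _).mp h1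
      · exact beq_eq_false_iff_ne.mp h2
    have hnmem : p ∉ c.keys := by
      intro hmem
      exact (List.nodup_append.mp hnd).2.2 p hmem p List.mem_cons_self rfl
    have hcont : c.contains p = false := by
      rw [PySem.Dict.contains_eq_decide_mem_keys]
      simp [hnmem]
    simp only [List.foldl_cons, hfind]
    rw [ih (c.insert p (pc.getD p 0)) ?_ ?_]
    · rw [PySem.Dict.items_insert_of_not_contains c _ hcont]
      simp
    · rw [PySem.Dict.keys_insert_of_not_contains c _ hcont]
      simpa [List.append_assoc] using hnd
    · rw [PySem.Dict.keys_insert_of_not_contains c _ hcont]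
      simpa [List.append_assoc] using hpw

theorem collapse_top (pc : PySem.Dict String Int) (L : List String)
    (hnd : L.Nodup)
    (hpw : L.Pairwise (fun e p => ¬ (e.toList <+: p.toList ∧ p ≠ e))) :
    (L.foldl (fun c pkg =>
      match c.keys.find? (fun existing => PySem.Str.startswith pkg existing && !(pkg == existing)) with
      | some existing => c.insert existing (c.getD existing 0 + pc.getD pkg 0)
      | none => c.insert pkg (pc.getD pkg 0)) (PySem.Dict.empty : PySem.Dict String Int)).items
    = L.map (fun p => (p, pc.getD p 0)) := by
  have h := collapse_no_merge pc L PySem.Dict.empty (by simpa using hnd) (by simpa using hpw)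
  simpa using h

theorem str_count_slash (s : String) :
    PySem.Str.count s "/" = s.toList.count '/' := by
  rw [PySem.Str.count_eq, show ("/" : String).toList = ['/'] from by decide]
  exact chars_count_single '/' s.toList

theorem main_eq (classes : List String) :
    class_package_counts_py classes = class_package_counts_py_alt classes := by
  have hc : classes.foldl (fun d cls => d.modify (pkgOf cls) 0 (· + 1))
      (PySem.Dict.empty : PySem.Dict String Int)
      = PySem.Dict.counter (classes.map pkgOf) := by
    rw [PySem.Dict.counter_eq_foldl, List.foldl_map]
  simp only [class_package_counts_py, class_package_counts_py_alt, hc,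
    PySem.Dict.keys_counter, PySem.Dict.items_counter]
  set P := classes.map pkgOf with hP
  set kd : String → Int := fun p => -((PySem.Str.count p "/" : Nat) : Int) with hkd
  have hnd : (PySem.List.sorted (PySem.Set.ofList P) kd).Nodup :=
    (PySem.List.sorted_perm (PySem.Set.ofList P) kd false).nodup_iff.mpr
      (PySem.Set.nodup_ofList P)
  have hshape : ∀ a ∈ PySem.List.sorted (PySem.Set.ofList P) kd, PkgShape a := by
    intro a ha
    have haP : a ∈ P := (PySem.Set.mem_ofList P a).mp
      ((PySem.List.mem_sorted (PySem.Set.ofList P) kd false a).mp ha)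
    obtain ⟨cls, _, rfl⟩ := List.mem_map.mp haP
    exact pkgOf_shape cls
  have hpw : (PySem.List.sorted (PySem.Set.ofList P) kd).Pairwise
      (fun e p => ¬ (e.toList <+: p.toList ∧ p ≠ e)) := by
    refine (PySem.List.sorted_pairwise (PySem.Set.ofList P) kd).imp_of_mem ?_
    intro a b ha hb hle
    apply no_proper_prefix a b (hshape a ha) (hshape b hb)
    have hle' : -((PySem.Str.count a "/" : Nat) : Int) ≤ -((PySem.Str.count b "/" : Nat) : Int) := hle
    rw [str_count_slash, str_count_slash] at hle'
    omega
  rw [collapse_top (PySem.Dict.counter P) _ hnd hpw]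
  have hmap : (PySem.List.sorted (PySem.Set.ofList P) kd).map
        (fun p => (p, (PySem.Dict.counter P).getD p 0))
      = (PySem.List.sorted (PySem.Set.ofList P) kd).map
        (fun k => (k, (P.count k : Int))) := by
    apply List.map_congr_left
    intro a _
    rw [PySem.Dict.getD_counter]
  rw [hmap]
  rw [sorted_map_comm (fun k => (k, (P.count k : Int)))
    (fun x : String × Int => -((PySem.Str.count x.1 "/" : Nat) : Int))]

-- ===== VERDICT (by name: the statement is the Claim_ definition above) =====
theorem class_package_counts_py_spec : Claim_equal_class_package_counts_py := by
  intro classes _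
  unfold Spec_class_package_counts_py
  exact main_eq classes
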